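-- pv_equiv track=rewrite | github.com/jgraeb/MergeUnitTests | intersection/receding_horizon_winsets_intersection.py | get_tester_states
-- ===== SOURCE A (Python) =====
-- def get_tester_states(state_dict):
--     x_min_grid = 0
--     x_max_grid = 7
--     y_min_grid = 0
--     y_max_grid = 7
--     tester_states = []
--     for ii in range(x_min_grid,x_max_grid):
--         for jj in range(y_min_grid,y_max_grid):
--             if (ii,jj) in state_dict:
--                 tester_states.append((ii,jj))
--     return tester_states
-- ===== SOURCE B (Python) =====
-- def get_tester_states(state_dict):
--     cells = [k for k in state_dict if 0 <= k[0] < 7 and 0 <= k[1] < 7]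
--     return sorted(cells, key=lambda c: 7 * c[0] + c[1])
-- ===== Notes on version B (the rewrite author's own statement) =====
-- stated objective: idiomatic
-- what changed: B iterates over the dict's keys once, filters those inside the 7x7 grid, and sorts them by row-major index, instead of scanning all 49 fixed grid cells and testing dict membership for each.
import Mathlib
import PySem

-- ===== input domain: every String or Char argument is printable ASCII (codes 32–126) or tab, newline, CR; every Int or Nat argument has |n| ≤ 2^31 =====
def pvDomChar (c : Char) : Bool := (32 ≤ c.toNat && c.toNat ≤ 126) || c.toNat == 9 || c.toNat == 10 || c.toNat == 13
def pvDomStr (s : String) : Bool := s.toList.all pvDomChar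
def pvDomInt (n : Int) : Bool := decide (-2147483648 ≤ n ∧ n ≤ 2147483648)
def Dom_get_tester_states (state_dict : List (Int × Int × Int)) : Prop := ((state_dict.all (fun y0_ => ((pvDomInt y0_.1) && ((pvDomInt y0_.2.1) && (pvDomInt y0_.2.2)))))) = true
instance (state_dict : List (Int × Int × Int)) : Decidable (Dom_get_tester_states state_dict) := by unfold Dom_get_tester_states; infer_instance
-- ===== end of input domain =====

-- B replaces A's scan of all 49 grid cells by a single filter-and-sort over the dict's keys (idiomatic, not measured faster).

-- ===== PORT A =====
-- A scans ii in range(0,7), jj in range(0,7) and appends (ii,jj) whenever it is a key of state_dict.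
def get_tester_states (state_dict : List (Int × Int × Int)) : List (Int × Int) :=
  (PySem.List.pyRange 0 7 1).foldl (fun tester_states ii =>
    (PySem.List.pyRange 0 7 1).foldl (fun tester_states jj =>
      if (state_dict.map (fun t => (t.1, t.2.1))).contains (ii, jj) then tester_states ++ [(ii, jj)]
      else tester_states) tester_states) []

-- ===== PORT B =====
-- 'for k in state_dict' iterates the dict's distinct keys in insertion order = dedup of the key list.
def get_tester_states_alt (state_dict : List (Int × Int × Int)) : List (Int × Int) :=
  let cells := (PySem.List.dedup (state_dict.map (fun t => (t.1, t.2.1)))).filter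
      (fun k => decide (0 ≤ k.1) && decide (k.1 < 7) && decide (0 ≤ k.2) && decide (k.2 < 7))
  PySem.List.sorted cells (fun c => 7 * c.1 + c.2)

-- ===== PRECONDITION & SPEC =====
def Spec_get_tester_states (state_dict : List (Int × Int × Int)) (out : List (Int × Int)) : Prop := out = get_tester_states_alt state_dict
instance (state_dict : List (Int × Int × Int)) (out : List (Int × Int)) : Decidable (Spec_get_tester_states state_dict out) := by unfold Spec_get_tester_states; infer_instance

-- ===== CLAIM (what is proved, stated in full; the proofs are below) =====
def Claim_equal_get_tester_states : Prop := ∀ (state_dict : List (Int × Int × Int)), Dom_get_tester_states state_dict → Spec_get_tester_states state_dict (get_tester_states state_dict)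

-- ===== LEMMAS AND PROOFS =====

-- the 49 grid cells in A's traversal order
def pvGrid : List (Int × Int) :=
  (PySem.List.pyRange 0 7 1).flatMap (fun ii => (PySem.List.pyRange 0 7 1).map (fun jj => (ii, jj)))

lemma pvRange7 : PySem.List.pyRange 0 7 1 = [0, 1, 2, 3, 4, 5, 6] := by decide

lemma pvA_eq_filter (sd : List (Int × Int × Int)) :
    get_tester_states sd = pvGrid.filter (fun c => (sd.map (fun t => (t.1, t.2.1))).contains c) := by
  unfold get_tester_states pvGrid
  simp only [PySem.List.foldl_append_if, PySem.List.foldl_append_eq_flatMap, List.nil_append,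
    List.filter_flatMap, List.filter_map]
  rfl

lemma pvMem_grid (c : Int × Int) : c ∈ pvGrid ↔ (0 ≤ c.1 ∧ c.1 < 7 ∧ 0 ≤ c.2 ∧ c.2 < 7) := by
  obtain ⟨x, y⟩ := c
  unfold pvGrid
  rw [pvRange7]
  simp only [List.mem_flatMap, List.mem_map, Prod.mk.injEq]
  constructor
  · rintro ⟨ii, hii, jj, hjj, hx, hy⟩
    subst hx; subst hy
    simp only [List.mem_cons, List.not_mem_nil, or_false] at hii hjj
    refine ⟨?_, ?_, ?_, ?_⟩ <;> omega
  · rintro ⟨h1, h2, h3, h4⟩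
    refine ⟨x, ?_, y, ?_, rfl, rfl⟩ <;> (simp only [List.mem_cons, List.not_mem_nil, or_false]; omega)

lemma pvGrid_nodup : pvGrid.Nodup := by decide

lemma pvGrid_pairwise : pvGrid.Pairwise (fun a b : Int × Int => 7 * a.1 + a.2 < 7 * b.1 + b.2) := by decide

theorem get_tester_states_spec : Claim_equal_get_tester_states := by
  intro sd _
  unfold Spec_get_tester_states get_tester_states_alt
  set K := sd.map (fun t => (t.1, t.2.1)) with hK
  set q : (Int × Int) → Bool := fun c => K.contains c with hq
  set cells := (PySem.List.dedup K).filter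
      (fun k => decide (0 ≤ k.1) && decide (k.1 < 7) && decide (0 ≤ k.2) && decide (k.2 < 7)) with hcells
  rw [pvA_eq_filter]
  refine (PySem.List.sorted_eq_of_perm_of_pairwise_lt cells (pvGrid.filter q) (fun c => 7 * c.1 + c.2) ?_ ?_).symm
  · refine (List.perm_ext_iff_of_nodup (pvGrid_nodup.filter q) ((PySem.List.nodup_dedup K).filter _)).mpr ?_
    intro c
    simp only [List.mem_filter, pvMem_grid, PySem.List.mem_dedup, hq, List.elem_eq_contains,
      List.contains_iff_mem, Bool.and_eq_true, decide_eq_true_eq]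
    tauto
  · exact pvGrid_pairwise.sublist List.filter_sublist
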